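-- pv_equiv track=rewrite | github.com/zhaoyewei/DSACDIC | utils_run.py | interleave_offsets_unbalance
-- ===== SOURCE A (Python) =====
-- def interleave_offsets_unbalance(batch, nu):
--     #(32//3)==10, [10,10,10]
--     groups = [batch // (nu + 1)] * (nu + 1)
--     #0,1->groups:[10,11,11]
--     for x in range(batch - sum(groups)):
--         groups[-x - 1] += 1
--     offsets = [0]
--     #[0],[10],[21],[32]
--     for g in groups:
--         offsets.append(offsets[-1] + g)
--     assert offsets[-1] == batch
--     return offsets
-- ===== SOURCE B (Python) =====
-- def interleave_offsets_unbalance(batch, nu):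
--     g = nu + 1
--     base, rem = divmod(batch, g)
--     threshold = g - rem
--     offsets = [base * k + max(0, k - threshold) for k in range(g + 1)]
--     assert offsets[-1] == batch
--     return offsets
-- ===== Notes on version B (the rewrite author's own statement) =====
-- stated objective: simpler
-- what changed: Replaces A's two accumulation loops (building the group list, bumping the last rem groups in place, then prefix-summing) with a single closed-form comprehension offsets[k] = base*k + max(0, k - (g - rem)).
-- outside the precondition, e.g. on interleave_offsets_unbalance(0, -2): A returns [0], B raises IndexError
import Mathlib
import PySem

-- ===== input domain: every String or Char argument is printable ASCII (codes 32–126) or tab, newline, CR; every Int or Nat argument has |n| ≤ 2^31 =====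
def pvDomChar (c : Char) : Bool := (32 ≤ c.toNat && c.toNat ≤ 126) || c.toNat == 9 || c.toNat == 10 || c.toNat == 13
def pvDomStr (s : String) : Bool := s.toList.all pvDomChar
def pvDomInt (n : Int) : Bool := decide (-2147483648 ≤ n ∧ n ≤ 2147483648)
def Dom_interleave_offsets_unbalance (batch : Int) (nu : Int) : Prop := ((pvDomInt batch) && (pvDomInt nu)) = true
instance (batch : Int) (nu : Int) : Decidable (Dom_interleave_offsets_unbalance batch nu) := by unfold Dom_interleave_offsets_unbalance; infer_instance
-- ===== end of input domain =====

-- B replaces A's two accumulation loops with one closed-form comprehension (same O(nu) cost, simpler).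


-- ===== PORT A =====
-- literal transliteration of A: build groups = [batch // (nu+1)] * (nu+1),
-- bump groups[-x-1] for x in range(batch - sum(groups)), then prefix-sum into offsets.
-- (the trailing `assert offsets[-1] == batch` always holds under Pre_, so the port returns offsets)
def interleave_offsets_unbalance (batch : Int) (nu : Int) : List Int :=
  let groups := PySem.List.pyRepeat [PySem.Int.floordiv batch (nu + 1)] (nu + 1)
  let groups := (PySem.List.pyRange 0 (batch - groups.sum) 1).foldl
    (fun gs x => PySem.List.pySetD gs (-x - 1) (PySem.List.pyGetD gs (-x - 1) 0 + 1)) groups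
  groups.foldl (fun offs g => offs ++ [PySem.List.pyGetD offs (-1) 0 + g]) [0]

-- ===== PORT B =====
-- literal transliteration of B: one closed-form comprehension
-- offsets = [base*k + max(0, k - threshold) for k in range(g + 1)]
-- (B's trailing assert always holds under Pre_, so the port returns the comprehension)
def interleave_offsets_unbalance_alt (batch : Int) (nu : Int) : List Int :=
  let g := nu + 1
  let base := PySem.Int.floordiv batch g
  let rem := PySem.Int.mod batch g
  let threshold := g - rem
  (PySem.List.pyRange 0 (g + 1) 1).map (fun k => base * k + max 0 (k - threshold))

-- ===== PRECONDITION & SPEC =====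
-- Pre_ excludes nu < 0: there A raises (ZeroDivisionError for nu = -1; IndexError or
-- AssertionError for nu ≤ -2 and batch ≠ 0) except the degenerate corner nu ≤ -2, batch = 0,
-- where A returns [0] only because `[v] * (nu+1)` silently yields an empty group list and
-- B's natural comprehension raises IndexError on its empty result instead.
def Pre_interleave_offsets_unbalance (batch : Int) (nu : Int) : Prop := 0 ≤ nu
instance (batch : Int) (nu : Int) : Decidable (Pre_interleave_offsets_unbalance batch nu) := by unfold Pre_interleave_offsets_unbalance; infer_instance
def pvWitness_interleave_offsets_unbalance : Int × Int := (32, 2)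
def Spec_interleave_offsets_unbalance (batch : Int) (nu : Int) (out : List Int) : Prop := out = interleave_offsets_unbalance_alt batch nu
instance (batch : Int) (nu : Int) (out : List Int) : Decidable (Spec_interleave_offsets_unbalance batch nu out) := by unfold Spec_interleave_offsets_unbalance; infer_instance

-- ===== CLAIM (what is proved, stated in full; the proofs are below) =====
def Claim_equal_interleave_offsets_unbalance : Prop := ∀ (batch : Int) (nu : Int), Dom_interleave_offsets_unbalance batch nu → Pre_interleave_offsets_unbalance batch nu → Spec_interleave_offsets_unbalance batch nu (interleave_offsets_unbalance batch nu)

-- ===== LEMMAS AND PROOFS =====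

-- negative-index list assignment resolved to a plain List.set
theorem pv_pySetD_neg (gs : List Int) (k : Nat) (v : Int) (h1 : 0 < k) (h2 : k ≤ gs.length) :
    PySem.List.pySetD gs (-(k:Int)) v = gs.set (gs.length - k) v := by
  simp only [PySem.List.pySetD, PySem.List.pySet?, PySem.List.pyIdx?]
  rw [if_neg (by omega), if_pos (by omega)]
  simp

theorem pv_set_replicate_last (v w : Int) (m : Nat) (h : 0 < m) :
    (List.replicate m v).set (m-1) w = List.replicate (m-1) v ++ [w] := by
  have e : List.replicate m v = List.replicate (m-1) v ++ [v] := by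
    rw [← List.replicate_succ']
    congr 1
    omega
  rw [e, List.set_append]
  rw [if_neg (by simp)]
  simp

-- A's first loop turns `replicate n base` into `replicate (n-r) base ++ replicate r (base+1)`
theorem pv_bump_loop (base : Int) (n r : Nat) (hr : r ≤ n) :
    (PySem.List.pyRange 0 (r : Int) 1).foldl
      (fun gs x => PySem.List.pySetD gs (-x - 1) (PySem.List.pyGetD gs (-x - 1) 0 + 1))
      (List.replicate n base)
    = List.replicate (n - r) base ++ List.replicate r (base + 1) := by
  induction r with
  | zero => simp [PySem.List.pyRange_one_eq_nil]
  | succ r ih =>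
      rw [show ((r+1 : Nat):Int) = (r:Int)+1 by push_cast; ring,
          PySem.List.pyRange_one_succ_right (by positivity), List.foldl_append,
          ih (by omega)]
      simp only [List.foldl_cons, List.foldl_nil]
      set gs := List.replicate (n - r) base ++ List.replicate r (base + 1) with hgs
      have hlen : gs.length = n := by simp [hgs]; omega
      have hidx : -(r:Int) - 1 = -(((r+1:Nat)):Int) := by push_cast; ring
      rw [hidx, PySem.List.pyGetD_neg_natCast gs (r+1) 0 (by omega) (by omega),
          pv_pySetD_neg gs (r+1) _ (by omega) (by omega)]
      simp only [hlen]
      have hget : gs[n - (r+1)]'(by omega) = base := by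
        simp only [hgs]
        rw [List.getElem_append_left (by simp; omega)]
        simp
      rw [hget, hgs, List.set_append, if_pos (by simp; omega)]
      rw [show n - (r+1) = (n-r) - 1 by omega,
          pv_set_replicate_last base (base+1) (n-r) (by omega)]
      rw [List.append_assoc]
      congr 1

-- A's second loop as a structural scan
def pvScan (c : Int) : List Int → List Int
  | [] => []
  | g :: t => (c + g) :: pvScan (c + g) t

theorem pv_offsets_loop (l : List Int) (acc : List Int) (c : Int) :
    l.foldl (fun offs g => offs ++ [PySem.List.pyGetD offs (-1) 0 + g]) (acc ++ [c])
    = (acc ++ [c]) ++ pvScan c l := by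
  induction l generalizing acc c with
  | nil => simp [pvScan]
  | cons g t ih =>
      simp only [List.foldl_cons, PySem.List.pyGetD_neg_one_append_singleton, pvScan]
      have := ih (acc ++ [c]) (c + g)
      simp only [List.append_assoc, List.cons_append, List.nil_append] at this ⊢
      exact this

theorem pv_scan_replicate (c v : Int) (m : Nat) (l2 : List Int) :
    pvScan c (List.replicate m v ++ l2)
    = (List.range m).map (fun (k : Nat) => c + v * ((k : Int) + 1)) ++ pvScan (c + v * m) l2 := by
  induction m generalizing c with
  | zero => simp
  | succ m ih =>
      simp only [List.replicate_succ, List.cons_append, pvScan, ih (c + v)]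
      rw [List.range_succ_eq_map]
      simp only [List.map_cons, List.map_map, Nat.cast_zero]
      push_cast
      congr 1
      · ring
      congr 1
      · exact List.map_congr_left (fun k _ => by simp only [Function.comp_apply]; push_cast; ring)
      · congr 1
        ring

-- the scans of A's bumped groups ARE B's closed form
theorem pv_main (base : Int) (n r : Nat) (hrn : r ≤ n) :
    0 :: ((List.range (n-r)).map (fun (k : Nat) => 0 + base * ((k : Int) + 1))
          ++ (List.range r).map (fun (k : Nat) => (0 + base * ((n-r : Nat) : Int)) + (base+1) * ((k : Int) + 1)))
    = (List.range (n+1)).map (fun (j : Nat) => base * (j : Int) + max 0 ((j : Int) - ((n : Int) - (r : Int)))) := by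
  apply List.ext_getElem
  · simp; omega
  · intro i h1 h2
    rw [List.getElem_map, List.getElem_range]
    cases i with
    | zero =>
        simp only [List.getElem_cons_zero, Nat.cast_zero]
        rw [max_eq_left (by omega)]
        ring
    | succ j =>
        simp only [List.getElem_cons_succ]
        rw [List.getElem_append]
        simp only [List.length_map, List.length_range, List.length_cons, List.length_append] at h1 ⊢
        split
        · rename_i hj
          rw [List.getElem_map, List.getElem_range]
          have hc : ((n - r : Nat) : Int) = (n : Int) - (r : Int) := by omega
          rw [max_eq_left (by omega)]
          push_cast
          ring
        · rename_i hj
          rw [List.getElem_map, List.getElem_range]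
          have hc : ((n - r : Nat) : Int) = (n : Int) - (r : Int) := by omega
          have hc2 : ((j - (n - r) : Nat) : Int) = (j : Int) - ((n : Int) - (r : Int)) := by omega
          rw [hc, hc2, max_eq_right (by omega)]
          push_cast
          ring

-- ===== VERDICT (by name: the statement is the Claim_ definition above) =====
theorem interleave_offsets_unbalance_spec : Claim_equal_interleave_offsets_unbalance := by
  intro batch nu _ hpre
  have hnu : (0:Int) ≤ nu := hpre
  unfold Spec_interleave_offsets_unbalance interleave_offsets_unbalance interleave_offsets_unbalance_alt
  simp only [PySem.List.pyRepeat_singleton]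
  set base := PySem.Int.floordiv batch (nu+1) with hbase
  set rem := PySem.Int.mod batch (nu+1) with hremdef
  set n := (nu+1).toNat with hndef
  have hn : (n:Int) = nu+1 := Int.toNat_of_nonneg (by omega)
  have hrem0 : 0 ≤ rem := PySem.Int.mod_nonneg (a := batch) (by omega)
  have hremlt : rem < nu + 1 := PySem.Int.mod_lt (a := batch) (by omega)
  set r := rem.toNat with hrdef
  have hr : (r:Int) = rem := Int.toNat_of_nonneg hrem0
  have hrn : r ≤ n := by omega
  have hsum : (List.replicate n base).sum = (n:Int)*base := by
    simp [List.sum_replicate]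
  rw [hsum]
  have hdiff : batch - (n:Int)*base = (r:Int) := by
    rw [hn, hr]
    linear_combination - PySem.Int.floordiv_mul_add_mod batch (nu+1)
  rw [hdiff, pv_bump_loop base n r hrn]
  have hOff := pv_offsets_loop (List.replicate (n-r) base ++ List.replicate r (base+1)) [] 0
  simp only [List.nil_append] at hOff
  rw [hOff]
  rw [pv_scan_replicate]
  rw [show (List.replicate r (base+1)) = List.replicate r (base+1) ++ [] from (List.append_nil _).symm]
  rw [pv_scan_replicate]
  simp only [pvScan, List.append_nil]
  rw [PySem.List.pyRange_one, List.map_map]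
  have hcast : (nu + 1 + 1 - 0).toNat = n + 1 := by omega
  rw [hcast]
  refine (pv_main base n r hrn).trans (List.map_congr_left ?_)
  intro j hj
  simp only [Function.comp_apply]
  rw [← hn, ← hr]
  simp only [zero_add]
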